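-- pv_equiv track=rewrite | github.com/violll/projectEuler | squareRootConvergents.py | squareRootConvergents
-- ===== SOURCE A (Python) =====
-- def digitCount(n):
--     return len(str(n))
--
-- def squareRootConvergents(nIters):
--     res = 0
--
--     for i in range(nIters):
--         s2num = 2
--         s2den = 5
--
--         if i == 0:
--             snum = 3
--             sden = 2
--
--         else:
--             snum = s2num
--             sden = s2den
--             for _ in range(i-1):
--                 snum, sden = sden, 2*sden+snum
--
--             snum += sden
--
--         if digitCount(snum) > digitCount(sden): res += 1
--
--     return res
-- ===== SOURCE B (Python) =====
-- def squareRootConvergents(nIters):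
--     # Maintain the convergent num/den incrementally: one O(D) update per step
--     # instead of recomputing it from scratch each iteration.
--     res = 0
--     num, den = 3, 2
--     for _ in range(nIters):
--         if len(str(num)) > len(str(den)):
--             res += 1
--         num, den = num + 2 * den, num + den
--     return res
-- ===== Notes on version B (the rewrite author's own statement) =====
-- stated objective: faster
-- what changed: B carries the convergent's numerator/denominator across iterations with one recurrence update per step, instead of A's rebuilding each convergent from scratch with an inner loop.
import Mathlib
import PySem

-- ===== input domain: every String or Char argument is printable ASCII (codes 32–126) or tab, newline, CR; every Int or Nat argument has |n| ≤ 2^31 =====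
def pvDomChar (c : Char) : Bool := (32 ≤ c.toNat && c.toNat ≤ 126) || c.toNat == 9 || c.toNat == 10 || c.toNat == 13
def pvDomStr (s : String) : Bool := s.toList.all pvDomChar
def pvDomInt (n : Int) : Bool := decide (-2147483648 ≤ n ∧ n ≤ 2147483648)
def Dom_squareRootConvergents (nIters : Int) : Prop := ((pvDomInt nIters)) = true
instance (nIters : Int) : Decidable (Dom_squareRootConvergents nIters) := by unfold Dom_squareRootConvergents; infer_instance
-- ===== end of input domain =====

-- B replaces A's per-iteration inner loop (rebuilding each convergent of sqrt(2) from
-- scratch) with one incremental recurrence update per iteration; same return value.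

-- ===== PORT A =====
-- len(str(n))
def digitCount (n : Int) : Int := PySem.Str.len (PySem.Int.toStr n)

-- body of A's outer 'for i in range(nIters)' loop, carrying res
def aBody (res : Int) (i : Int) : Int :=
  let s2num : Int := 2
  let s2den : Int := 5
  let p : Int × Int :=
    if i = 0 then (3, 2)
    else
      -- snum, sden = s2num, s2den; for _ in range(i-1): snum, sden = sden, 2*sden+snum
      let q := (PySem.List.pyRange 0 (i - 1) 1).foldl
        (fun (q : Int × Int) _ => (q.2, 2 * q.2 + q.1)) (s2num, s2den)
      (q.1 + q.2, q.2)  -- snum += sden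
  if digitCount p.1 > digitCount p.2 then res + 1 else res

def squareRootConvergents (nIters : Int) : Int :=
  (PySem.List.pyRange 0 nIters 1).foldl aBody 0

-- ===== PORT B =====
-- body of B's loop: state (res, num, den); count first, then one recurrence step
def bBody (st : Int × Int × Int) (_i : Int) : Int × Int × Int :=
  let res := if digitCount st.2.1 > digitCount st.2.2 then st.1 + 1 else st.1
  (res, st.2.1 + 2 * st.2.2, st.2.1 + st.2.2)

def squareRootConvergents_alt (nIters : Int) : Int :=
  ((PySem.List.pyRange 0 nIters 1).foldl bBody (0, 3, 2)).1

-- ===== PRECONDITION & SPEC =====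
def Spec_squareRootConvergents (nIters : Int) (out : Int) : Prop := out = squareRootConvergents_alt nIters
instance (nIters : Int) (out : Int) : Decidable (Spec_squareRootConvergents nIters out) := by unfold Spec_squareRootConvergents; infer_instance

-- ===== CLAIM (what is proved, stated in full; the proofs are below) =====
def Claim_equal_squareRootConvergents : Prop := ∀ (nIters : Int), Dom_squareRootConvergents nIters → Spec_squareRootConvergents nIters (squareRootConvergents nIters)

-- ===== LEMMAS AND PROOFS =====

-- A's inner-loop step and B's incremental step
def astep (q : Int × Int) : Int × Int := (q.2, 2 * q.2 + q.1)
def bstep (q : Int × Int) : Int × Int := (q.1 + 2 * q.2, q.1 + q.2)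
def bPair (k : Nat) : Int × Int := bstep^[k] (3, 2)

lemma foldl_const_iterate {α β : Type} (g : α → α) :
    ∀ (l : List β) (init : α), l.foldl (fun a _ => g a) init = g^[l.length] init := by
  intro l
  induction l with
  | nil => intro init; simp
  | cons x xs ih => intro init; simp [List.foldl_cons, ih, Function.iterate_succ_apply]

lemma bPair_succ (k : Nat) :
    bPair (k + 1) = ((astep^[k] (2, 5)).1 + (astep^[k] (2, 5)).2, (astep^[k] (2, 5)).2) := by
  induction k with
  | zero => decide
  | succ k ih =>
    have h1 : bPair (k + 2) = bstep (bPair (k + 1)) := by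
      simp [bPair, Function.iterate_succ_apply']
    rw [h1, ih, Function.iterate_succ_apply']
    simp [astep, bstep]
    constructor <;> ring

lemma aBody_eq (res : Int) (n : Nat) :
    aBody res (n : Int) =
      (if digitCount (bPair n).1 > digitCount (bPair n).2 then res + 1 else res) := by
  cases n with
  | zero => simp [aBody, bPair]
  | succ k =>
    have hne : ((k + 1 : Nat) : Int) ≠ 0 := by positivity
    have hlen : (PySem.List.pyRange 0 (((k + 1 : Nat) : Int) - 1) 1).length = k := by
      rw [PySem.List.length_pyRange_one]; omega
    have hfold : (PySem.List.pyRange 0 (((k + 1 : Nat) : Int) - 1) 1).foldl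
        (fun (q : Int × Int) _ => (q.2, 2 * q.2 + q.1)) ((2 : Int), (5 : Int))
        = astep^[k] (2, 5) := by
      have := foldl_const_iterate (α := Int × Int) astep
        (PySem.List.pyRange 0 (((k + 1 : Nat) : Int) - 1) 1) (2, 5)
      simpa [astep, hlen] using this
    simp only [aBody, if_neg hne, hfold, bPair_succ]

lemma main_fold (n : Nat) :
    (PySem.List.pyRange 0 (n : Int) 1).foldl bBody (0, 3, 2)
      = ((PySem.List.pyRange 0 (n : Int) 1).foldl aBody 0, bPair n) := by
  induction n with
  | zero => decide
  | succ k ih =>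
    have hsplit : PySem.List.pyRange 0 ((k + 1 : Nat) : Int) 1
        = PySem.List.pyRange 0 (k : Nat) 1 ++ [(k : Int)] := by
      have := PySem.List.pyRange_one_succ_right (a := 0) (b := (k : Int)) (by positivity)
      simpa using this
    rw [hsplit, List.foldl_append, List.foldl_append, ih]
    simp only [List.foldl_cons, List.foldl_nil]
    have hb : bBody ((PySem.List.pyRange 0 (k : Nat) 1).foldl aBody 0, bPair k) (k : Int)
        = (aBody ((PySem.List.pyRange 0 (k : Nat) 1).foldl aBody 0) (k : Int), bPair (k + 1)) := by
      rw [aBody_eq]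
      have hstep : bPair (k + 1) = bstep (bPair k) := by
        simp [bPair, Function.iterate_succ_apply']
      simp [bBody, hstep, bstep]
    rw [hb]

-- ===== VERDICT (by name: the statement is the Claim_ definition above) =====
theorem squareRootConvergents_spec : Claim_equal_squareRootConvergents := by
  intro nIters _
  unfold Spec_squareRootConvergents squareRootConvergents squareRootConvergents_alt
  by_cases h : nIters ≤ 0
  · rw [PySem.List.pyRange_one_eq_nil h]; rfl
  · have hn : nIters = (nIters.toNat : Int) := by omega
    rw [hn, main_fold nIters.toNat]
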